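-- pv_equiv track=rewrite | github.com/gam-bit/algopy | Codes/2023/프로그래머스/2023현대모비스예선_상담원인원.py | calc_waiting_time
-- ===== SOURCE A (Python) =====
-- import heapq
--
-- def calc_waiting_time(a, hq):
--     """
--     :param a: 특정 상담 유형의 멘토 수
--     """
--     wating_time = 0
--     rooms = [0 for _ in range(a)] # 최대 a개 원소
--
--     for req in hq:
--         start, duration, _ = req
--         prev_end = heapq.heappop(rooms)
--         if start >= prev_end:
--             heapq.heappush(rooms, start+duration)
--         else:
--             wating_time += prev_end - start
--             heapq.heappush(rooms, prev_end+duration)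
--     return wating_time
-- ===== SOURCE B (Python) =====
-- def calc_waiting_time(a, hq):
--     """
--     :param a: 특정 상담 유형의 멘토 수
--     """
--     waiting_time = 0
--     rooms = [0] * a
--     for start, duration, _ in hq:
--         prev_end = rooms[0]
--         idx = 0
--         for i in range(1, len(rooms)):
--             if rooms[i] < prev_end:
--                 prev_end = rooms[i]
--                 idx = i
--         if start >= prev_end:
--             rooms[idx] = start + duration
--         else:
--             waiting_time += prev_end - start
--             rooms[idx] = prev_end + duration
--     return waiting_time
-- ===== Notes on version B (the rewrite author's own statement) =====
-- stated objective: simpler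
-- what changed: Replaces the heapq min-heap (heappop/heappush) by a plain list of end-times: each request does one linear scan for the earliest-available room and writes the new end time back in place.
import Mathlib
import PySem

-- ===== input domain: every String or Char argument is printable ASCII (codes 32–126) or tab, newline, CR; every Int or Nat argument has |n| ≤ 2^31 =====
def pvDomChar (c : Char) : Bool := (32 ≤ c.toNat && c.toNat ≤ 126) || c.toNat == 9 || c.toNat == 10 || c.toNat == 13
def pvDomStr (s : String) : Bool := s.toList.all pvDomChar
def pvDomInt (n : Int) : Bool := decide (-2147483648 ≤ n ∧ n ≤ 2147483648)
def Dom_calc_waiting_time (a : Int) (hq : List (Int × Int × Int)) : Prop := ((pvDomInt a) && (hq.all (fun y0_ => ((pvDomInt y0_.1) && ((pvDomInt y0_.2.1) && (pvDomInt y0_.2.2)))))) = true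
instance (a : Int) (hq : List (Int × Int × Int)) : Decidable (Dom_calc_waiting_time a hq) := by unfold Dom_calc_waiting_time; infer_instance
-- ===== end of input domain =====

-- B replaces A's heapq min-heap by a plain list of room end-times with a linear
-- scan-for-minimum and an in-place write-back per request (objective: simpler).

-- ===== PORT A =====
-- heapq on a list of Ints: heappop returns (and removes) the minimum element;
-- over Ints the popped VALUES depend only on the multiset, so the heap is
-- modelled as that multiset (a list): pop = first minimum removed, push = append.
-- This is exact for the values A observes.
def calcA_loop : List (Int × Int × Int) → Int → List Int → Int
  | [], w, _ => w
  | (start, duration, _) :: rest, w, rooms =>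
    match rooms.min? with
    | none => w   -- unreachable under Pre_: Python's heappop raises IndexError here
    | some prevEnd =>
      let rooms' := rooms.erase prevEnd
      if start ≥ prevEnd then
        calcA_loop rest w (rooms' ++ [start + duration])
      else
        calcA_loop rest (w + (prevEnd - start)) (rooms' ++ [prevEnd + duration])

def calc_waiting_time (a : Int) (hq : List (Int × Int × Int)) : Int :=
  calcA_loop hq 0 (List.replicate a.toNat 0)

-- ===== PORT B =====
-- the inner 'for i in range(1, len(rooms))' scan: carries (prev_end, idx),
-- i is the position of the current head of the remaining list.
def findMinB : List Int → Int → Nat → Nat → Int × Nat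
  | [], prevEnd, idx, _ => (prevEnd, idx)
  | x :: rest, prevEnd, idx, i =>
    if x < prevEnd then findMinB rest x i (i + 1)
    else findMinB rest prevEnd idx (i + 1)

def calcB_loop : List (Int × Int × Int) → Int → List Int → Int
  | [], w, _ => w
  | (start, duration, _) :: rest, w, rooms =>
    match rooms with
    | [] => w   -- unreachable under Pre_: Python's rooms[0] raises IndexError here
    | r0 :: rs =>
      let pe := findMinB rs r0 0 1
      if start ≥ pe.1 then
        calcB_loop rest w (rooms.set pe.2 (start + duration))
      else
        calcB_loop rest (w + (pe.1 - start)) (rooms.set pe.2 (pe.1 + duration))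

def calc_waiting_time_alt (a : Int) (hq : List (Int × Int × Int)) : Int :=
  calcB_loop hq 0 (List.replicate a.toNat 0)

-- ===== PRECONDITION & SPEC =====
-- Pre_ excludes only the inputs where Python A raises IndexError (heappop from an
-- empty room list: a ≤ 0 with a nonempty request list); B raises there too (rooms[0]).
def Pre_calc_waiting_time (a : Int) (hq : List (Int × Int × Int)) : Prop :=
  hq = [] ∨ 1 ≤ a
instance (a : Int) (hq : List (Int × Int × Int)) : Decidable (Pre_calc_waiting_time a hq) := by
  unfold Pre_calc_waiting_time; infer_instance

def pvWitness_calc_waiting_time : Int × (List (Int × Int × Int)) :=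
  (2, [(0, 5, 1), (1, 3, 2), (2, 4, 0)])

def Spec_calc_waiting_time (a : Int) (hq : List (Int × Int × Int)) (out : Int) : Prop := out = calc_waiting_time_alt a hq
instance (a : Int) (hq : List (Int × Int × Int)) (out : Int) : Decidable (Spec_calc_waiting_time a hq out) := by unfold Spec_calc_waiting_time; infer_instance

-- ===== CLAIM (what is proved, stated in full; the proofs are below) =====
def Claim_equal_calc_waiting_time : Prop := ∀ (a : Int) (hq : List (Int × Int × Int)), Dom_calc_waiting_time a hq → Pre_calc_waiting_time a hq → Spec_calc_waiting_time a hq (calc_waiting_time a hq)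

-- ===== LEMMAS AND PROOFS =====

-- findMinB's value component is the running fold of min.
theorem findMinB_fst (rs : List Int) : ∀ (p : Int) (idx i : Nat),
    (findMinB rs p idx i).1 = rs.foldl min p := by
  induction rs with
  | nil => intro p idx i; simp [findMinB]
  | cons x rest ih =>
    intro p idx i
    simp only [findMinB, List.foldl_cons]
    by_cases h : x < p
    · simp [h, ih]
      congr 1
      omega
    · simp [h, ih]
      congr 1
      omega

-- findMinB's index component points at an occurrence of the minimum.
theorem findMinB_get (rooms : List Int) : ∀ (rs : List Int) (p : Int) (idx i : Nat),
    rooms.drop i = rs → rooms[idx]? = some p →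
    rooms[(findMinB rs p idx i).2]? = some (findMinB rs p idx i).1 := by
  intro rs
  induction rs generalizing rooms with
  | nil => intro p idx i _ hp; simpa [findMinB] using hp
  | cons x rest ih =>
    intro p idx i hdrop hp
    have hi : rooms[i]? = some x := by
      have h0 : (rooms.drop i)[0]? = rooms[i + 0]? := List.getElem?_drop
      simp [hdrop] at h0
      exact h0.symm
    have hdrop' : rooms.drop (i + 1) = rest := by
      have h1 : List.drop 1 (List.drop i rooms) = List.drop (i + 1) rooms := List.drop_drop
      simp [hdrop] at h1
      exact h1.symm
    by_cases h : x < p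
    · simpa [findMinB, h] using ih rooms x i (i + 1) hdrop' hi
    · simpa [findMinB, h] using ih rooms p idx (i + 1) hdrop' hp

-- the minimum of a permuted list is the same
theorem min?_perm {l₁ l₂ : List Int} (h : l₁.Perm l₂) : l₁.min? = l₂.min? := by
  cases h1 : l₁.min? with
  | none =>
    rw [List.min?_eq_none_iff] at h1
    subst h1
    have : l₂ = [] := (List.Perm.nil_eq h).symm
    simp [this]
  | some m =>
    rw [List.min?_eq_some_iff] at h1
    symm
    rw [List.min?_eq_some_iff]
    exact ⟨h.mem_iff.mp h1.1, fun b hb => h1.2 b (h.mem_iff.mpr hb)⟩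

-- setting position j (holding value m) to v is, up to permutation,
-- v consed onto the list with that occurrence removed
theorem set_perm_cons_eraseIdx (l : List Int) (j : Nat) (m v : Int)
    (hj : l[j]? = some m) : (l.set j v).Perm (v :: l.eraseIdx j) := by
  have hlen : j < l.length := by
    by_contra h
    simp [List.getElem?_eq_none (Nat.le_of_not_lt h)] at hj
  rw [List.set_eq_take_append_cons_drop, if_pos hlen, List.eraseIdx_eq_take_drop_succ]
  exact List.perm_middle

-- removing the occurrence at index j (value m) matches erasing the first m, up to perm
theorem eraseIdx_perm_erase (l : List Int) (j : Nat) (m : Int)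
    (hj : l[j]? = some m) : (l.eraseIdx j).Perm (l.erase m) := by
  have hlen : j < l.length := by
    by_contra h
    simp [List.getElem?_eq_none (Nat.le_of_not_lt h)] at hj
  have hjv : l[j] = m := by
    have := List.getElem?_eq_getElem hlen
    rw [hj] at this
    exact (Option.some.injEq _ _).mp this.symm
  have hm : m ∈ l := hjv ▸ l.getElem_mem hlen
  have h1 : l.Perm (m :: l.eraseIdx j) := by
    conv_lhs => rw [← List.take_append_drop j l, ← List.getElem_cons_drop hlen, hjv]
    rw [List.eraseIdx_eq_take_drop_succ]
    exact List.perm_middle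
  have h2 : l.Perm (m :: l.erase m) := List.perm_cons_erase hm
  exact (h1.symm.trans h2).cons_inv

-- main invariant: the two loops agree whenever their room lists are permutations
theorem loops_agree (hq : List (Int × Int × Int)) : ∀ (w : Int) (r1 r2 : List Int),
    r1.Perm r2 → calcA_loop hq w r1 = calcB_loop hq w r2 := by
  induction hq with
  | nil => intro w r1 r2 _; rfl
  | cons req rest ih =>
    obtain ⟨start, duration, t⟩ := req
    intro w r1 r2 hperm
    cases r2 with
    | nil =>
      have : r1 = [] := List.Perm.eq_nil (by simpa using hperm)
      subst this
      simp [calcA_loop, calcB_loop, List.min?_nil]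
    | cons r0 rs =>
      have hne : r1.min? = some (rs.foldl min r0) := by
        rw [min?_perm hperm, List.min?_cons']
      have hm1 : (findMinB rs r0 0 1).1 = rs.foldl min r0 := findMinB_fst rs r0 0 1
      have hget : (r0 :: rs)[(findMinB rs r0 0 1).2]? = some (findMinB rs r0 0 1).1 :=
        findMinB_get (r0 :: rs) rs r0 0 1 (by simp) (by simp)
      set m := rs.foldl min r0 with hm
      set j := (findMinB rs r0 0 1).2 with hjdef
      have hgetm : (r0 :: rs)[j]? = some m := by rw [← hm1]; exact hget
      have hmem1 : m ∈ r1 := by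
        have := List.min?_eq_some_iff.mp hne
        exact this.1
      have hstep : ∀ v : Int, (r1.erase m ++ [v]).Perm ((r0 :: rs).set j v) := by
        intro v
        have p1 : (r1.erase m ++ [v]).Perm (v :: r1.erase m) := List.perm_append_singleton v _
        have p2 : (r1.erase m).Perm ((r0 :: rs).erase m) := hperm.erase m
        have p3 : ((r0 :: rs).eraseIdx j).Perm ((r0 :: rs).erase m) :=
          eraseIdx_perm_erase _ j m hgetm
        have p4 : ((r0 :: rs).set j v).Perm (v :: (r0 :: rs).eraseIdx j) :=
          set_perm_cons_eraseIdx _ j m v hgetm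
        exact (p1.trans ((p2.trans p3.symm).cons v)).trans p4.symm
      simp only [calcA_loop, calcB_loop, hne, hm1]
      by_cases hc : start ≥ m
      · simp only [if_pos hc]
        exact ih w _ _ (hstep (start + duration))
      · simp only [if_neg hc]
        exact ih (w + (m - start)) _ _ (hstep (m + duration))

-- ===== VERDICT (by name: the statement is the Claim_ definition above) =====
theorem calc_waiting_time_spec : Claim_equal_calc_waiting_time := by
  intro a hq _ _
  unfold Spec_calc_waiting_time calc_waiting_time calc_waiting_time_alt
  exact loops_agree hq 0 _ _ (List.Perm.refl _)
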